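-- pv_equiv track=rewrite | github.com/AltynbekMaksat/PP2 | lab3/functions1.py | check
-- ===== SOURCE A (Python) =====
-- def check(a):
--     c = 0
--     for i in range(len(a)):
--         if c == 2:
--             if a[i]==7:
--                 return True
--         if a[i] == 0 and c!=2:
--             c += 1
--     else:
--         return False
-- ===== SOURCE B (Python) =====
-- def check(a):
--     try:
--         i1 = a.index(0)
--         i2 = a.index(0, i1 + 1)
--     except ValueError:
--         return False
--     return 7 in a[i2 + 1:]
-- ===== Notes on version B (the rewrite author's own statement) =====
-- stated objective: simpler
-- what changed: Replaced A's single stateful pass with a zero-counter and early return by locating the first two zeros with list.index and testing '7 in' the suffix after the second zero.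
import Mathlib
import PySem

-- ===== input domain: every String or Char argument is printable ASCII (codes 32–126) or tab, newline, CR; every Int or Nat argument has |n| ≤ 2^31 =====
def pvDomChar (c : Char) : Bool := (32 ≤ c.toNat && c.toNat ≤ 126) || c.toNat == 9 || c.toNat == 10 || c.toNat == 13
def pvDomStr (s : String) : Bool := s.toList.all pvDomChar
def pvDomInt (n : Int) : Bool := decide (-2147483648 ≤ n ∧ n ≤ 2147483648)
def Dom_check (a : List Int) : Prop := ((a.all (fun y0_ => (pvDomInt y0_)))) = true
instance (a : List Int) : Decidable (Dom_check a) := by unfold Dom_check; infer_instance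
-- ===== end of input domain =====

-- B replaces A's stateful zero-counter loop by locating the first two zeros and testing 7-membership in the suffix (objective: simpler).

-- ===== PORT A =====
-- A's 'for i in range(len(a))' with counter c, early return True, final False;
-- recursion over the elements in order carries the same counter c.
def check_go (c : Nat) : List Int → Bool
  | [] => false
  | x :: rest =>
    if c == 2 && x == 7 then true
    else check_go (if x == 0 && c != 2 then c + 1 else c) rest

def check (a : List Int) : Bool := check_go 0 a

-- ===== PORT B =====
-- a.index(0) → PySem.List.index?; a.index(0, i1+1) (search from i1+1, absolute result)
-- ported step for step as i1+1 plus the index found in the dropped suffix; '7 in a[i2+1:]' → contains on the slice.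
def check_alt (a : List Int) : Bool :=
  match PySem.List.index? a 0 with
  | none => false
  | some i1 =>
    match PySem.List.index? (a.drop (i1 + 1)) 0 with
    | none => false
    | some j =>
      let i2 := i1 + 1 + j
      (PySem.List.slice a (some ((i2 : Int) + 1)) none).contains 7

-- ===== PRECONDITION & SPEC =====
def Spec_check (a : List Int) (out : Bool) : Prop := out = check_alt a
instance (a : List Int) (out : Bool) : Decidable (Spec_check a out) := by unfold Spec_check; infer_instance

-- ===== CLAIM (what is proved, stated in full; the proofs are below) =====
def Claim_equal_check : Prop := ∀ (a : List Int), Dom_check a → Spec_check a (check a)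

-- ===== LEMMAS AND PROOFS =====

-- once c = 2 the counter never changes and the loop returns True iff some later element is 7
theorem check_go_two (l : List Int) : check_go 2 l = l.contains 7 := by
  induction l with
  | nil => rfl
  | cons x rest ih =>
    by_cases hx : x = 7
    · simp [check_go, hx]
    · simp [check_go, hx, ih]
      intro h; exact absurd h.symm hx

-- with c = 1 the loop finds the next zero and then scans for 7 after it
theorem check_go_one (l : List Int) :
    check_go 1 l =
      (match PySem.List.index? l 0 with
       | none => false
       | some j => (l.drop (j + 1)).contains 7) := by
  induction l with
  | nil => rfl
  | cons x rest ih =>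
    by_cases hx : x = 0
    · subst hx
      rw [PySem.List.index?_cons_self]
      simpa [check_go] using check_go_two rest
    · rw [PySem.List.index?_cons_of_ne _ hx]
      have hstep : check_go 1 (x :: rest) = check_go 1 rest := by
        simp [check_go, hx]
      rw [hstep, ih]
      cases PySem.List.index? rest 0 with
      | none => rfl
      | some j => simp only [Option.map_some, List.drop_succ_cons]

-- with c = 0: find the first zero, then behave like c = 1 on the rest of the list
theorem check_go_zero (l : List Int) :
    check_go 0 l =
      (match PySem.List.index? l 0 with
       | none => false
       | some i1 =>
          match PySem.List.index? (l.drop (i1 + 1)) 0 with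
          | none => false
          | some j => (l.drop (i1 + 1 + j + 1)).contains 7) := by
  induction l with
  | nil => rfl
  | cons x rest ih =>
    by_cases hx : x = 0
    · subst hx
      rw [PySem.List.index?_cons_self]
      have h0 : check_go 0 ((0:Int) :: rest) = check_go 1 rest := by simp [check_go]
      rw [h0, check_go_one rest]
      simp only [List.drop_succ_cons, List.drop_zero, Nat.zero_add]
      cases PySem.List.index? rest 0 with
      | none => rfl
      | some j => simp [Nat.add_comm]
    · rw [PySem.List.index?_cons_of_ne _ hx]
      have h0 : check_go 0 (x :: rest) = check_go 0 rest := by simp [check_go, hx]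
      rw [h0, ih]
      cases h1 : PySem.List.index? rest 0 with
      | none => rfl
      | some i1 =>
        simp only [Option.map_some, List.drop_succ_cons]
        cases PySem.List.index? (rest.drop (i1 + 1)) 0 with
        | none => rfl
        | some j =>
          have he : i1 + 1 + 1 + j = i1 + 1 + j + 1 := by omega
          simp [he]

-- ===== VERDICT (by name: the statement is the Claim_ definition above) =====
theorem check_spec : Claim_equal_check := by
  intro a _
  unfold Spec_check check check_alt
  rw [check_go_zero]
  cases h1 : PySem.List.index? a 0 with
  | none => rfl
  | some i1 =>
    simp only []
    cases h2 : PySem.List.index? (a.drop (i1 + 1)) 0 with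
    | none => rfl
    | some j =>
      simp only []
      have hc : (((i1 + 1 + j : Nat)) : Int) + 1 = (((i1 + 1 + j + 1 : Nat)) : Int) := by
        push_cast; ring
      rw [hc, PySem.List.slice_from_natCast]
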